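-- pv_equiv track=rewrite | github.com/giahuy-le/glossary-tool | text_processing.py | _diverse_order
-- ===== SOURCE A (Python) =====
-- def _diverse_order(n: int) -> list[int]:
--     if n <= 0:
--         return []
--     order, used = [], set()
--     left, right = 0, n - 1
--     mid = n // 2
--     for a in (0, right, mid):
--         if 0 <= a < n and a not in used:
--             order.append(a)
--             used.add(a)
--     l, r, lm, rm = 1, n - 2, mid - 1, mid + 1
--     while len(order) < n:
--         for cand in (l, r, lm, rm):
--             if 0 <= cand < n and cand not in used:
--                 order.append(cand)
--                 used.add(cand)
--         l += 1
--         r -= 1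
--         lm -= 1
--         rm += 1
--         if l > r and lm < 0 and rm >= n:
--             order.extend([i for i in range(n) if i not in used])
--             break
--     return order
-- ===== SOURCE B (Python) =====
-- def _diverse_order(n: int) -> list[int]:
--     if n <= 0:
--         return []
--     mid = n // 2
--
--     def key(v: int) -> int:
--         # first position of v in the conceptual candidate stream
--         # [0, n-1, mid, (1, n-2, mid-1, mid+1), (2, n-3, mid-2, mid+2), ...]
--         best = []
--         if v == 0:
--             best.append(0)
--         if v == n - 1:
--             best.append(1)
--         if v == mid:
--             best.append(2)
--         if v >= 1:
--             best.append(3 + 4 * (v - 1))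
--         if v <= n - 2:
--             best.append(4 + 4 * (n - 2 - v))
--         if v <= mid - 1:
--             best.append(5 + 4 * (mid - 1 - v))
--         if v >= mid + 1:
--             best.append(6 + 4 * (v - mid - 1))
--         return min(best)
--
--     return sorted(range(n), key=key)
-- ===== Notes on version B (the rewrite author's own statement) =====
-- stated objective: alternative
-- what changed: B computes for each index a closed-form priority key (the position of its first occurrence in A's conceptual candidate stream) and returns sorted(range(n), key=key), eliminating the candidate stream, the dedup set and the while-loop with its counters and range() fallback entirely.
import Mathlib
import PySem

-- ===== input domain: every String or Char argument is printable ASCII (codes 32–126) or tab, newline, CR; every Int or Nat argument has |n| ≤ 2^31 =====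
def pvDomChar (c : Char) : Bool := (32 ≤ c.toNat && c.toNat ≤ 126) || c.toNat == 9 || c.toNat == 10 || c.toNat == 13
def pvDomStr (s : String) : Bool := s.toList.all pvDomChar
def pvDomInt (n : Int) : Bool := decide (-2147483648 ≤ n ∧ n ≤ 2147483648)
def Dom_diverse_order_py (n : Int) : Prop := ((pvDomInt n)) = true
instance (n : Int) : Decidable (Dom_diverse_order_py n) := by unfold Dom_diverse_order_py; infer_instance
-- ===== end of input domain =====

-- B replaces A's stream-of-candidates-with-dedup loop by a key sort: each index gets a
-- closed-form priority key and B returns sorted(range(n), key); alternative algorithm, same result.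


-- ===== PORT A =====
-- the shared append-if-fresh body of A's two loops: `if 0 <= a < n and a not in used: append; add`
def pvStepA (n : Int) (s : List Int × PySem.Set Int) (a : Int) : List Int × PySem.Set Int :=
  if 0 ≤ a ∧ a < n ∧ a ∉ s.2 then (s.1 ++ [a], PySem.Set.add s.2 a) else s

-- A's `while len(order) < n` loop. The Nat fuel is only a totality guard: the loop's
-- fallback fires within n rounds, so fuel n.toNat (proved sufficient below) is never exhausted.
def pvLoopA (n : Int) : Nat → List Int → PySem.Set Int → Int → Int → Int → Int → List Int
  | 0, order, _, _, _, _, _ => order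
  | fuel + 1, order, used, l, r, lm, rm =>
    if (order.length : Int) < n then
      let s := [l, r, lm, rm].foldl (pvStepA n) (order, used)
      if l + 1 > r - 1 ∧ lm - 1 < 0 ∧ rm + 1 ≥ n then
        s.1 ++ (PySem.List.pyRange 0 n 1).filter (fun i => decide (i ∉ s.2))
      else pvLoopA n fuel s.1 s.2 (l + 1) (r - 1) (lm - 1) (rm + 1)
    else order

def diverse_order_py (n : Int) : List Int :=
  if n ≤ 0 then []
  else
    let mid := PySem.Int.floordiv n 2
    let s := [0, n - 1, mid].foldl (pvStepA n) ([], PySem.Set.empty)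
    pvLoopA n n.toNat s.1 s.2 1 (n - 2) (mid - 1) (mid + 1)

-- ===== PORT B =====
-- Source B's `best` list, built by the same sequence of conditional appends
def pvBest (n v : Int) : List Int :=
  let mid := PySem.Int.floordiv n 2
  (if v = 0 then [(0 : Int)] else []) ++
  (if v = n - 1 then [1] else []) ++
  (if v = mid then [2] else []) ++
  (if 1 ≤ v then [3 + 4 * (v - 1)] else []) ++
  (if v ≤ n - 2 then [4 + 4 * (n - 2 - v)] else []) ++
  (if v ≤ mid - 1 then [5 + 4 * (mid - 1 - v)] else []) ++
  (if mid + 1 ≤ v then [6 + 4 * (v - mid - 1)] else [])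

-- Source B's `key(v) = min(best)`; Python's min raises on [], but `sorted` only feeds key
-- values 0 ≤ v < n, where best is nonempty (proved below), so the default is never used.
def pvKeyB (n v : Int) : Int := (PySem.List.min? (pvBest n v) (fun x => x)).getD 0

def diverse_order_py_alt (n : Int) : List Int :=
  if n ≤ 0 then []
  else PySem.List.sorted (PySem.List.pyRange 0 n 1) (pvKeyB n) false

-- ===== PRECONDITION & SPEC =====
def Spec_diverse_order_py (n : Int) (out : List Int) : Prop := out = diverse_order_py_alt n
instance (n : Int) (out : List Int) : Decidable (Spec_diverse_order_py n out) := by unfold Spec_diverse_order_py; infer_instance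

-- ===== CLAIM (what is proved, stated in full; the proofs are below) =====
def Claim_equal_diverse_order_py : Prop := ∀ (n : Int), Dom_diverse_order_py n → Spec_diverse_order_py n (diverse_order_py n)

-- ===== LEMMAS AND PROOFS =====

-- proof-only abstraction: the common "append v if fresh and in range" step on the list alone
def pvPure (n : Int) (out : List Int) (v : Int) : List Int :=
  if 0 ≤ v ∧ v < n ∧ v ∉ out then out ++ [v] else out

-- the round-t candidate tuple and A's conceptual candidate stream
def pvF (n t : Int) : List Int :=
  [1 + t, n - 2 - t, PySem.Int.floordiv n 2 - 1 - t, PySem.Int.floordiv n 2 + 1 + t]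

def pvStream (n : Int) : List Int :=
  [0, n - 1, PySem.Int.floordiv n 2] ++ (PySem.List.pyRange 0 n 1).flatMap (pvF n)

-- the stream element at position i, in closed form
def pvC (n t : Int) (j : Nat) : Int :=
  if j = 0 then 1 + t else if j = 1 then n - 2 - t
  else if j = 2 then PySem.Int.floordiv n 2 - 1 - t else PySem.Int.floordiv n 2 + 1 + t

def pvG (n : Int) (i : Nat) : Int :=
  if i = 0 then 0 else if i = 1 then n - 1 else if i = 2 then PySem.Int.floordiv n 2
  else pvC n (((i - 3) / 4 : Nat) : Int) ((i - 3) % 4)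

-- ===== A-side lemmas (A equals the fold of pvPure over the stream) =====

theorem pvPure_mono (n : Int) (out : List Int) (v x : Int) (h : x ∈ out) : x ∈ pvPure n out v := by
  unfold pvPure; split <;> simp [h]

theorem pvFoldPure_mono (n : Int) (cs : List Int) (out : List Int) (x : Int) (h : x ∈ out) :
    x ∈ cs.foldl (pvPure n) out := by
  induction cs generalizing out with
  | nil => exact h
  | cons c cs ih => exact ih _ (pvPure_mono n out c x h)

theorem pvFoldPure_mem_of_cand (n : Int) (cs : List Int) (out : List Int) (v : Int)
    (hv : v ∈ cs) (h0 : 0 ≤ v) (h1 : v < n) : v ∈ cs.foldl (pvPure n) out := by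
  induction cs generalizing out with
  | nil => cases hv
  | cons c cs ih =>
    rcases List.mem_cons.1 hv with hv | hv
    · subst hv
      refine pvFoldPure_mono n cs (pvPure n out v) v ?_
      by_cases hm : v ∈ out
      · exact pvPure_mono n out v v hm
      · unfold pvPure
        rw [if_pos ⟨h0, h1, hm⟩]
        simp
    · exact ih _ hv

theorem pvPure_nodup (n : Int) (out : List Int) (v : Int) (h : out.Nodup) : (pvPure n out v).Nodup := by
  unfold pvPure
  split
  · next hc =>
      simp only [List.nodup_append, h, true_and]
      refine ⟨List.nodup_singleton v, fun a ha b hb => ?_⟩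
      simp only [List.mem_singleton] at hb
      subst hb
      exact fun he => hc.2.2 (he ▸ ha)
  · exact h

theorem pvFoldPure_nodup (n : Int) (cs : List Int) (out : List Int) (h : out.Nodup) :
    (cs.foldl (pvPure n) out).Nodup := by
  induction cs generalizing out with
  | nil => exact h
  | cons c cs ih => exact ih _ (pvPure_nodup n out c h)

theorem pvPure_range (n : Int) (out : List Int) (v : Int) (h : ∀ x ∈ out, 0 ≤ x ∧ x < n) :
    ∀ x ∈ pvPure n out v, 0 ≤ x ∧ x < n := by
  unfold pvPure; split <;> intro x hx
  · rcases List.mem_append.1 hx with hx | hx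
    · exact h x hx
    · simp at hx; subst hx; omega
  · exact h x hx

theorem pvFoldPure_range (n : Int) (cs : List Int) (out : List Int) (h : ∀ x ∈ out, 0 ≤ x ∧ x < n) :
    ∀ x ∈ cs.foldl (pvPure n) out, 0 ≤ x ∧ x < n := by
  induction cs generalizing out with
  | nil => exact h
  | cons c cs ih => exact ih _ (pvPure_range n out c h)

-- pigeonhole: a nodup list of n ints inside [0,n) contains every one of them
theorem pvFull (n : Int) (out : List Int) (hd : out.Nodup) (hr : ∀ x ∈ out, 0 ≤ x ∧ x < n)
    (hl : n ≤ (out.length : Int)) : ∀ x, 0 ≤ x → x < n → x ∈ out := by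
  intro x hx0 hx1
  have hsub : out.toFinset ⊆ Finset.Ico (0 : Int) n := by
    intro y hy
    rcases hr y (List.mem_toFinset.1 hy) with ⟨h1, h2⟩
    exact Finset.mem_Ico.2 ⟨h1, h2⟩
  have hcard : (Finset.Ico (0 : Int) n).card ≤ out.toFinset.card := by
    rw [List.toFinset_card_of_nodup hd]
    simp only [Int.card_Ico]
    omega
  have heq := Finset.eq_of_subset_of_card_le hsub hcard
  have : x ∈ out.toFinset := heq ▸ Finset.mem_Ico.2 ⟨hx0, hx1⟩
  exact List.mem_toFinset.1 this

theorem pvPure_noop (n : Int) (out : List Int) (v : Int)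
    (hfull : ∀ x, 0 ≤ x → x < n → x ∈ out) : pvPure n out v = out := by
  unfold pvPure
  split
  · next h => exact absurd (hfull v h.1 h.2.1) h.2.2
  · rfl

theorem pvFoldPure_noop (n : Int) (cs : List Int) (out : List Int)
    (hfull : ∀ x, 0 ≤ x → x < n → x ∈ out) : cs.foldl (pvPure n) out = out := by
  induction cs with
  | nil => rfl
  | cons c cs ih => simp [List.foldl_cons, pvPure_noop n out c hfull, ih]

-- simulation: A's (order, used) step equals the order-only pure step, set mirroring list
theorem pvStepAB (n : Int) (s : List Int × PySem.Set Int) (a : Int)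
    (hrel : ∀ v, v ∈ s.2 ↔ v ∈ s.1) :
    (pvStepA n s a).1 = pvPure n s.1 a ∧ (∀ v, v ∈ (pvStepA n s a).2 ↔ v ∈ (pvStepA n s a).1) := by
  unfold pvStepA pvPure
  by_cases h : 0 ≤ a ∧ a < n ∧ a ∉ s.1
  · have h' : 0 ≤ a ∧ a < n ∧ a ∉ s.2 := ⟨h.1, h.2.1, fun hc => h.2.2 ((hrel a).1 hc)⟩
    rw [if_pos h', if_pos h]
    refine ⟨rfl, fun v => ?_⟩
    simp [PySem.Set.mem_add, hrel v]
  · have h' : ¬ (0 ≤ a ∧ a < n ∧ a ∉ s.2) := by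
      intro hc; exact h ⟨hc.1, hc.2.1, fun hm => hc.2.2 ((hrel a).2 hm)⟩
    rw [if_neg h', if_neg h]
    exact ⟨rfl, hrel⟩

theorem pvFoldAB (n : Int) (cs : List Int) (s : List Int × PySem.Set Int)
    (hrel : ∀ v, v ∈ s.2 ↔ v ∈ s.1) :
    (cs.foldl (pvStepA n) s).1 = cs.foldl (pvPure n) s.1 ∧
    (∀ v, v ∈ (cs.foldl (pvStepA n) s).2 ↔ v ∈ (cs.foldl (pvStepA n) s).1) := by
  induction cs generalizing s with
  | nil => exact ⟨rfl, hrel⟩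
  | cons c cs ih =>
    obtain ⟨h1, h2⟩ := pvStepAB n s c hrel
    obtain ⟨ih1, ih2⟩ := ih (pvStepA n s c) h2
    exact ⟨by simp only [List.foldl_cons]; rw [ih1, h1], by simp only [List.foldl_cons]; exact ih2⟩

-- the candidate stream from round t on
def pvStreamFrom (n t : Int) : List Int := (PySem.List.pyRange t n 1).flatMap (pvF n)

theorem pvStreamFrom_cons (n t : Int) (h : t < n) :
    pvStreamFrom n t = pvF n t ++ pvStreamFrom n (t + 1) := by
  unfold pvStreamFrom
  rw [PySem.List.pyRange_one_cons (by omega : t < n)]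
  simp [List.flatMap_cons]

-- main loop simulation
theorem pvLoop_eq (n : Int) (hn : 0 < n) : ∀ (k : Nat) (t : Int) (order : List Int) (used : PySem.Set Int),
    0 ≤ t → (n - 2 - t).toNat < k →
    (∀ v, v ∈ used ↔ v ∈ order) → order.Nodup → (∀ x ∈ order, 0 ≤ x ∧ x < n) →
    (∀ v, 0 ≤ v → v < n → (v ≤ t ∨ n - 1 - t ≤ v) → v ∈ order) →
    pvLoopA n k order used (1 + t) (n - 2 - t)
        (PySem.Int.floordiv n 2 - 1 - t) (PySem.Int.floordiv n 2 + 1 + t)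
      = (pvStreamFrom n t).foldl (pvPure n) order := by
  intro k
  induction k with
  | zero =>
    intro t order used ht hk hrel hnd hr hcov
    exact absurd hk (Nat.not_lt_zero _)
  | succ k ih =>
    intro t order used ht hk hrel hnd hr hcov
    by_cases hlen : (order.length : Int) < n
    · -- not yet saturated: order misses some value, so coverage is incomplete, so t < n - 2
      have htlt : t < n - 2 := by
        by_contra hge
        have hfullcov : ∀ v, 0 ≤ v → v < n → v ∈ order := by
          intro v h0 h1; exact hcov v h0 h1 (by omega)
        have hsub : Finset.Ico (0 : Int) n ⊆ order.toFinset := by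
          intro y hy
          rcases Finset.mem_Ico.1 hy with ⟨h1, h2⟩
          exact List.mem_toFinset.2 (hfullcov y h1 h2)
        have := Finset.card_le_card hsub
        rw [List.toFinset_card_of_nodup hnd] at this
        simp only [Int.card_Ico] at this
        omega
      rw [pvLoopA, if_pos hlen]
      set mid := PySem.Int.floordiv n 2 with hmid
      set cs : List Int := [1 + t, n - 2 - t, mid - 1 - t, mid + 1 + t] with hcs
      obtain ⟨hAB1, hAB2⟩ := pvFoldAB n cs (order, used) hrel
      set order' : List Int := cs.foldl (pvPure n) order with horder'
      have hnd' : order'.Nodup := pvFoldPure_nodup n cs order hnd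
      have hr' : ∀ x ∈ order', 0 ≤ x ∧ x < n := pvFoldPure_range n cs order hr
      have hcov' : ∀ v, 0 ≤ v → v < n → (v ≤ t + 1 ∨ n - 1 - (t + 1) ≤ v) → v ∈ order' := by
        intro v h0 h1 hc
        rcases hc with hc | hc
        · rcases lt_or_eq_of_le hc with hlt | heq
          · exact pvFoldPure_mono n cs order v (hcov v h0 h1 (by omega))
          · subst heq
            exact pvFoldPure_mem_of_cand n cs order (t + 1) (by simp [hcs]; omega) (by omega) (by omega)
        · by_cases hge : n - 1 - t ≤ v
          · exact pvFoldPure_mono n cs order v (hcov v h0 h1 (Or.inr hge))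
          · have : v = n - 2 - t := by omega
            subst this
            exact pvFoldPure_mem_of_cand n cs order (n - 2 - t) (by simp [hcs]) (by omega) (by omega)
      simp only
      split
      · next hcond =>
        -- fallback: l' > r' already implies full coverage, so the appended filter is empty
        have hfull' : ∀ v, 0 ≤ v → v < n → v ∈ order' := by
          intro v h0 h1
          exact hcov' v h0 h1 (by omega)
        have hfilter : (PySem.List.pyRange 0 n 1).filter
            (fun i => decide (i ∉ (cs.foldl (pvStepA n) (order, used)).2)) = [] := by
          rw [List.filter_eq_nil_iff]
          intro i hi
          rcases (PySem.List.mem_pyRange_one).1 hi with ⟨h1, h2⟩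
          simp only [decide_eq_true_eq, not_not]
          exact (hAB2 i).2 (by rw [hAB1]; exact hfull' i h1 h2)
        rw [hfilter, List.append_nil, hAB1]
        rw [pvStreamFrom_cons n t (by omega)]
        rw [List.foldl_append]
        exact (pvFoldPure_noop n _ order' hfull').symm
      · next hcond =>
        have hrec := ih (t + 1) order' (cs.foldl (pvStepA n) (order, used)).2 (by omega)
          (by omega) (by intro v; rw [hAB1] at hAB2; exact hAB2 v) hnd' hr' hcov'
        rw [pvStreamFrom_cons n t (by omega), List.foldl_append]
        rw [hAB1]
        have harg : pvLoopA n k order' (cs.foldl (pvStepA n) (order, used)).2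
            (1 + t + 1) (n - 2 - t - 1) (mid - 1 - t - 1) (mid + 1 + t + 1)
            = pvLoopA n k order' (cs.foldl (pvStepA n) (order, used)).2
            (1 + (t + 1)) (n - 2 - (t + 1)) (mid - 1 - (t + 1)) (mid + 1 + (t + 1)) := by
          ring_nf
        rw [harg, hrec]
        simp only [horder', hcs, pvF, hmid]
    · -- saturated on entry: loop exits, remaining stream is a no-op
      rw [pvLoopA, if_neg hlen]
      have hfull : ∀ x, 0 ≤ x → x < n → x ∈ order :=
        pvFull n order hnd hr (by omega)
      exact (pvFoldPure_noop n _ order hfull).symm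

-- A equals the single dedup fold over the conceptual stream
theorem pvA_eq_fold (n : Int) (hn : 0 < n) :
    diverse_order_py n = (pvStream n).foldl (pvPure n) [] := by
  unfold diverse_order_py
  rw [if_neg (by omega : ¬ n ≤ 0)]
  set mid := PySem.Int.floordiv n 2 with hmid
  have hmid0 : 0 ≤ mid := by
    rw [hmid, PySem.Int.floordiv_eq_ediv_of_pos (by norm_num)]
    omega
  have hmidn : mid < n := by
    rw [hmid, PySem.Int.floordiv_eq_ediv_of_pos (by norm_num)]
    omega
  set seeds : List Int := [0, n - 1, mid] with hseeds
  obtain ⟨hAB1, hAB2⟩ := pvFoldAB n seeds ([], PySem.Set.empty)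
    (by intro v; simp [PySem.Set.empty])
  set order₀ : List Int := seeds.foldl (pvPure n) [] with horder₀
  have hcov0 : ∀ v, 0 ≤ v → v < n → (v ≤ 0 ∨ n - 1 - 0 ≤ v) → v ∈ order₀ := by
    intro v h0 h1 hc
    have hv : v = 0 ∨ v = n - 1 := by omega
    rcases hv with hv | hv <;> subst hv
    · exact pvFoldPure_mem_of_cand n seeds [] 0 (by simp [hseeds]) le_rfl hn
    · exact pvFoldPure_mem_of_cand n seeds [] (n - 1) (by simp [hseeds]) (by omega) (by omega)
  have hmain := pvLoop_eq n hn n.toNat 0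
    (seeds.foldl (pvStepA n) ([], PySem.Set.empty)).1
    (seeds.foldl (pvStepA n) ([], PySem.Set.empty)).2
    le_rfl (by omega) hAB2
    (by rw [hAB1]; exact pvFoldPure_nodup n seeds [] List.nodup_nil)
    (by rw [hAB1]; exact pvFoldPure_range n seeds [] (by simp))
    (by rw [hAB1]; exact hcov0)
  have harg : pvLoopA n n.toNat (seeds.foldl (pvStepA n) ([], PySem.Set.empty)).1
      (seeds.foldl (pvStepA n) ([], PySem.Set.empty)).2 1 (n - 2) (mid - 1) (mid + 1)
      = pvLoopA n n.toNat (seeds.foldl (pvStepA n) ([], PySem.Set.empty)).1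
      (seeds.foldl (pvStepA n) ([], PySem.Set.empty)).2
      (1 + 0) (n - 2 - 0) (mid - 1 - 0) (mid + 1 + 0) := by ring_nf
  simp only
  rw [harg, hmain, hAB1]
  unfold pvStream pvStreamFrom
  rw [List.foldl_append]

-- ===== B-side lemmas (the stream fold is the key sort) =====

theorem pvStream_length (n : Int) (hn : 0 ≤ n) :
    (pvStream n).length = 3 + 4 * n.toNat := by
  unfold pvStream
  rw [List.length_append]
  have : ∀ (m : Nat) (a : Int), a + m = n →
      ((PySem.List.pyRange a n 1).flatMap (pvF n)).length = 4 * m := by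
    intro m
    induction m with
    | zero =>
      intro a ha
      rw [PySem.List.pyRange_one_eq_nil (by omega)]
      simp
    | succ m ih =>
      intro a ha
      rw [PySem.List.pyRange_one_cons (by omega : a < n)]
      rw [List.flatMap_cons, List.length_append, ih (a + 1) (by push_cast at ha; omega)]
      simp [pvF]
      omega
  rw [this n.toNat 0 (by omega)]
  simp

theorem pvF_getElem? (n t : Int) (j : Nat) (hj : j < 4) :
    (pvF n t)[j]? = some (pvC n t j) := by
  interval_cases j <;> simp [pvF, pvC]

theorem pvFlat_getElem? (n : Int) : ∀ (m : Nat) (a : Int) (k : Nat), a + m = n → k < 4 * m →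
    ((PySem.List.pyRange a n 1).flatMap (pvF n))[k]? = some (pvC n (a + ((k / 4 : Nat) : Int)) (k % 4)) := by
  intro m
  induction m with
  | zero => intro a k _ hk; omega
  | succ m ih =>
    intro a k ha hk
    rw [PySem.List.pyRange_one_cons (by omega : a < n), List.flatMap_cons]
    by_cases h4 : k < 4
    · rw [List.getElem?_append_left (by simp [pvF]; omega)]
      rw [pvF_getElem? n a k h4]
      have e1 : (k / 4 : Nat) = 0 := by omega
      have e2 : (k % 4 : Nat) = k := by omega
      rw [e1, e2]
      norm_num
    · have hlen : (pvF n a).length = 4 := by simp [pvF]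
      rw [List.getElem?_append_right (by omega)]
      rw [hlen]
      rw [ih (a + 1) (k - 4) (by push_cast at ha ⊢; omega) (by omega)]
      have h2 : ((k - 4) % 4 : Nat) = k % 4 := by omega
      have h3 : (a + 1) + (((k - 4) / 4 : Nat) : Int) = a + ((k / 4 : Nat) : Int) := by
        have h1 : ((k - 4) / 4 : Nat) + 1 = k / 4 := by omega
        push_cast [← h1]
        ring
      rw [h2, h3]

theorem pvStream_getElem? (n : Int) (hn : 0 ≤ n) (i : Nat) (hi : i < 3 + 4 * n.toNat) :
    (pvStream n)[i]? = some (pvG n i) := by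
  match i, hi with
  | 0, _ => simp [pvStream, pvG]
  | 1, _ => simp [pvStream, pvG]
  | 2, _ => simp [pvStream, pvG]
  | (j + 3), hi =>
    unfold pvStream pvG
    rw [List.getElem?_append_right (by simp)]
    simp only [List.length_cons, List.length_nil]
    rw [show j + 3 - (0 + 1 + 1 + 1) = j from by omega]
    rw [pvFlat_getElem? n n.toNat 0 j (by omega) (by omega)]
    rw [if_neg (by omega), if_neg (by omega), if_neg (by omega)]
    norm_num

-- pvBest membership, spelled out
theorem pvMemBest (n v c : Int) : c ∈ pvBest n v ↔
    ((v = 0 ∧ c = 0) ∨ (v = n - 1 ∧ c = 1) ∨ (v = PySem.Int.floordiv n 2 ∧ c = 2) ∨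
     (1 ≤ v ∧ c = 3 + 4 * (v - 1)) ∨ (v ≤ n - 2 ∧ c = 4 + 4 * (n - 2 - v)) ∨
     (v ≤ PySem.Int.floordiv n 2 - 1 ∧ c = 5 + 4 * (PySem.Int.floordiv n 2 - 1 - v)) ∨
     (PySem.Int.floordiv n 2 + 1 ≤ v ∧ c = 6 + 4 * (v - PySem.Int.floordiv n 2 - 1))) := by
  simp only [pvBest, List.mem_append, List.mem_ite_nil_right, List.mem_singleton]
  tauto

-- pvBest is exactly the occurrence positions: each element of pvBest points at v in the stream,
-- and each stream position holding v is an element of pvBest.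
theorem pvBest_sound (n v : Int) (hn : 0 < n) (h0 : 0 ≤ v) (h1 : v < n) :
    ∀ c ∈ pvBest n v, ∃ i : Nat, (i : Int) = c ∧ i < 3 + 4 * n.toNat ∧ pvG n i = v := by
  intro c hc
  have hfd : PySem.Int.floordiv n 2 = n / 2 := PySem.Int.floordiv_eq_ediv_of_pos (by norm_num)
  rw [pvMemBest] at hc
  simp only [hfd] at hc
  rcases hc with ⟨hv, rfl⟩ | ⟨hv, rfl⟩ | ⟨hv, rfl⟩ | ⟨hv, rfl⟩ | ⟨hv, rfl⟩ | ⟨hv, rfl⟩ | ⟨hv, rfl⟩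
  · exact ⟨0, by omega, by omega, by simp [pvG, hv]⟩
  · exact ⟨1, by omega, by omega, by simp [pvG, hv]⟩
  · exact ⟨2, by omega, by omega, by simp [pvG, hv]⟩
  · refine ⟨3 + 4 * (v - 1).toNat, by omega, by omega, ?_⟩
    simp only [pvG, pvC, hfd]
    rw [show 3 + 4 * (v - 1).toNat - 3 = 4 * (v - 1).toNat from by omega]
    rw [show 4 * (v - 1).toNat / 4 = (v - 1).toNat from by omega,
        show 4 * (v - 1).toNat % 4 = 0 from by omega]
    simp
    omega
  · refine ⟨3 + 4 * (n - 2 - v).toNat + 1, by omega, by omega, ?_⟩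
    simp only [pvG, pvC, hfd]
    rw [show 3 + 4 * (n - 2 - v).toNat + 1 - 3 = 4 * (n - 2 - v).toNat + 1 from by omega]
    rw [show (4 * (n - 2 - v).toNat + 1) / 4 = (n - 2 - v).toNat from by omega,
        show (4 * (n - 2 - v).toNat + 1) % 4 = 1 from by omega]
    simp
    omega
  · refine ⟨3 + 4 * (n / 2 - 1 - v).toNat + 2, by omega, by omega, ?_⟩
    simp only [pvG, pvC, hfd]
    rw [show 3 + 4 * (n / 2 - 1 - v).toNat + 2 - 3 = 4 * (n / 2 - 1 - v).toNat + 2 from by omega]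
    rw [show (4 * (n / 2 - 1 - v).toNat + 2) / 4 = (n / 2 - 1 - v).toNat from by omega,
        show (4 * (n / 2 - 1 - v).toNat + 2) % 4 = 2 from by omega]
    simp
    omega
  · refine ⟨3 + 4 * (v - n / 2 - 1).toNat + 3, by omega, by omega, ?_⟩
    simp only [pvG, pvC, hfd]
    rw [show 3 + 4 * (v - n / 2 - 1).toNat + 3 - 3 = 4 * (v - n / 2 - 1).toNat + 3 from by omega]
    rw [show (4 * (v - n / 2 - 1).toNat + 3) / 4 = (v - n / 2 - 1).toNat from by omega,
        show (4 * (v - n / 2 - 1).toNat + 3) % 4 = 3 from by omega]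
    simp
    omega

theorem pvBest_complete (n v : Int) (hn : 0 < n) (h0 : 0 ≤ v) (h1 : v < n)
    (i : Nat) (hi : i < 3 + 4 * n.toNat) (hg : pvG n i = v) : (i : Int) ∈ pvBest n v := by
  have hfd : PySem.Int.floordiv n 2 = n / 2 := PySem.Int.floordiv_eq_ediv_of_pos (by norm_num)
  unfold pvG at hg
  rw [hfd] at hg
  rw [pvMemBest]
  simp only [hfd]
  by_cases h3 : i < 3
  · interval_cases i <;> norm_num at hg <;> omega
  · obtain ⟨j, rfl⟩ : ∃ j, i = j + 3 := ⟨i - 3, by omega⟩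
    rw [if_neg (by omega), if_neg (by omega), if_neg (by omega)] at hg
    rw [show j + 3 - 3 = j from by omega] at hg
    rcases (by omega : j % 4 = 0 ∨ j % 4 = 1 ∨ j % 4 = 2 ∨ j % 4 = 3) with hc | hc | hc | hc <;>
      rw [hc] at hg <;> simp only [pvC, hfd] at hg <;> norm_num at hg <;> push_cast <;> omega

theorem pvBest_ne_nil (n v : Int) (h0 : 0 ≤ v) : pvBest n v ≠ [] := by
  by_cases hv : v = 0
  · exact List.ne_nil_of_mem (a := (0 : Int)) (by simp [pvBest, hv])
  · refine List.ne_nil_of_mem (a := (3 + 4 * (v - 1) : Int)) ?_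
    rw [pvMemBest]
    omega

-- the key really is min over pvBest: it is an element and a lower bound
theorem pvKeyB_mem (n v : Int) (h0 : 0 ≤ v) : pvKeyB n v ∈ pvBest n v := by
  unfold pvKeyB
  rcases hm : PySem.List.min? (pvBest n v) (fun x => x) with - | m
  · exact absurd ((PySem.List.min?_eq_none_iff _ _).1 hm) (pvBest_ne_nil n v h0)
  · simpa using PySem.List.min?_mem hm

theorem pvKeyB_le (n v : Int) (h0 : 0 ≤ v) (c : Int) (hc : c ∈ pvBest n v) : pvKeyB n v ≤ c := by
  unfold pvKeyB
  rcases hm : PySem.List.min? (pvBest n v) (fun x => x) with - | m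
  · exact absurd ((PySem.List.min?_eq_none_iff _ _).1 hm) (pvBest_ne_nil n v h0)
  · simpa using PySem.List.min?_isMin hm c hc

-- the key is the FIRST stream position holding v
theorem pvKey_hit (n v : Int) (hn : 0 < n) (h0 : 0 ≤ v) (h1 : v < n) :
    ∃ i : Nat, (i : Int) = pvKeyB n v ∧ i < 3 + 4 * n.toNat ∧ pvG n i = v :=
  pvBest_sound n v hn h0 h1 (pvKeyB n v) (pvKeyB_mem n v h0)

theorem pvKey_min (n v : Int) (hn : 0 < n) (h0 : 0 ≤ v) (h1 : v < n)
    (i : Nat) (hi : i < 3 + 4 * n.toNat) (hg : pvG n i = v) : pvKeyB n v ≤ (i : Int) :=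
  pvKeyB_le n v h0 (i : Int) (pvBest_complete n v hn h0 h1 i hi hg)

-- the dedup fold over the stream: invariant over the processed prefix
theorem pvFold_inv (n : Int) (hn : 0 < n) : ∀ (m k : Nat) (acc : List Int),
    (pvStream n).length = k + m →
    acc.Pairwise (fun a b => pvKeyB n a < pvKeyB n b) →
    (∀ v, v ∈ acc ↔ (0 ≤ v ∧ v < n ∧ pvKeyB n v < (k : Int))) →
    (((pvStream n).drop k).foldl (pvPure n) acc).Pairwise (fun a b => pvKeyB n a < pvKeyB n b) ∧
    (∀ v, v ∈ ((pvStream n).drop k).foldl (pvPure n) acc ↔ (0 ≤ v ∧ v < n)) := by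
  have hlen := pvStream_length n (by omega)
  intro m
  induction m with
  | zero =>
    intro k acc hk hpw hmem
    rw [List.drop_of_length_le (by omega)]
    simp only [List.foldl_nil]
    refine ⟨hpw, fun v => ?_⟩
    rw [hmem v]
    constructor
    · rintro ⟨a, b, -⟩; exact ⟨a, b⟩
    · rintro ⟨a, b⟩
      refine ⟨a, b, ?_⟩
      obtain ⟨i, hi1, hi2, -⟩ := pvKey_hit n v hn a b
      omega
  | succ m ih =>
    intro k acc hk hpw hmem
    have hklt : k < (pvStream n).length := by omega
    rw [List.drop_eq_getElem_cons hklt, List.foldl_cons]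
    have hw : (pvStream n)[k] = pvG n k := by
      have := pvStream_getElem? n (by omega) k (by omega)
      rw [List.getElem?_eq_getElem hklt] at this
      exact Option.some.inj this
    set w := (pvStream n)[k] with hwdef
    have hdrop : (pvStream n).drop (k + 1) = ((pvStream n).drop k).tail := by
      rw [List.tail_drop]
    -- establish the invariant at k+1 for pvPure n acc w
    have key_eq_k : ∀ v, 0 ≤ v → v < n → pvKeyB n v = (k : Int) → v = w := by
      intro v a b hkey
      obtain ⟨i, hi1, hi2, hi3⟩ := pvKey_hit n v hn a b
      have : i = k := by omega
      rw [hw, ← this, hi3]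
    have step : (pvPure n acc w).Pairwise (fun a b => pvKeyB n a < pvKeyB n b) ∧
        (∀ v, v ∈ pvPure n acc w ↔ (0 ≤ v ∧ v < n ∧ pvKeyB n v < (k : Int) + 1)) := by
      unfold pvPure
      split
      · next hc =>
        obtain ⟨hw0, hw1, hwmem⟩ := hc
        have hkw : pvKeyB n w = (k : Int) := by
          have hle : pvKeyB n w ≤ (k : Int) :=
            pvKey_min n w hn hw0 hw1 k (by omega) hw.symm
          have hge : ¬ pvKeyB n w < (k : Int) := by
            intro hlt
            exact hwmem ((hmem w).2 ⟨hw0, hw1, hlt⟩)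
          omega
        constructor
        · rw [List.pairwise_append]
          refine ⟨hpw, List.pairwise_singleton _ _, fun a ha b hb => ?_⟩
          simp only [List.mem_singleton] at hb
          subst hb
          rw [hkw]
          exact ((hmem a).1 ha).2.2
        · intro v
          rw [List.mem_append, List.mem_singleton, hmem v]
          constructor
          · rintro (⟨a, b, c⟩ | rfl)
            · exact ⟨a, b, by omega⟩
            · exact ⟨hw0, hw1, by omega⟩
          · rintro ⟨a, b, c⟩
            by_cases hlt : pvKeyB n v < (k : Int)
            · exact Or.inl ⟨a, b, hlt⟩
            · exact Or.inr (key_eq_k v a b (by omega))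
      · next hc =>
        refine ⟨hpw, fun v => ?_⟩
        rw [hmem v]
        constructor
        · rintro ⟨a, b, c⟩; exact ⟨a, b, by omega⟩
        · rintro ⟨a, b, c⟩
          by_cases hlt : pvKeyB n v < (k : Int)
          · exact ⟨a, b, hlt⟩
          · -- v = w, and w is out of range or already in acc; out of range is impossible
            have hvw := key_eq_k v a b (by omega)
            have hwin : w ∈ acc := by
              by_contra hnin
              exact hc ⟨hvw ▸ a, hvw ▸ b, hnin⟩
            refine ⟨a, b, ?_⟩
            rw [hvw]
            exact ((hmem w).1 hwin).2.2
    obtain ⟨spw, smem⟩ := step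
    refine ih (k + 1) (pvPure n acc w) (by omega) spw (fun v => ?_)
    rw [smem v]
    have : ((k + 1 : Nat) : Int) = (k : Int) + 1 := by push_cast; ring
    rw [this]

theorem pvFold_sorted (n : Int) (hn : 0 < n) :
    (pvStream n).foldl (pvPure n) [] =
      PySem.List.sorted (PySem.List.pyRange 0 n 1) (pvKeyB n) false := by
  have hbase := pvFold_inv n hn (pvStream n).length 0 [] (Nat.zero_add _).symm (List.Pairwise.nil)
    (by
      intro v
      simp only [List.not_mem_nil, false_iff, not_and]
      intro a b hlt
      obtain ⟨i, hi1, -, -⟩ := pvKey_hit n v hn a b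
      omega)
  rw [List.drop_zero] at hbase
  obtain ⟨hpw, hmem⟩ := hbase
  symm
  apply PySem.List.sorted_eq_of_perm_of_pairwise_lt
  · -- the fold result is a permutation of range(n)
    have hnd : ((pvStream n).foldl (pvPure n) []).Nodup :=
      pvFoldPure_nodup n (pvStream n) [] List.nodup_nil
    rw [List.perm_ext_iff_of_nodup hnd (PySem.List.nodup_pyRange_one 0 n)]
    intro a
    rw [hmem a, PySem.List.mem_pyRange_one]
  · exact hpw

-- ===== VERDICT (by name: the statement is the Claim_ definition above) =====
theorem diverse_order_py_spec : Claim_equal_diverse_order_py := by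
  unfold Claim_equal_diverse_order_py Spec_diverse_order_py
  intro n _
  by_cases hn : n ≤ 0
  · unfold diverse_order_py diverse_order_py_alt
    rw [if_pos hn, if_pos hn]
  · unfold diverse_order_py_alt
    rw [if_neg hn]
    rw [pvA_eq_fold n (by omega), pvFold_sorted n (by omega)]
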